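-- pv_equiv track=rewrite | github.com/helali1993/reidemeister_planar_graphs | my_code_1/my_helpers.py | edges_set_dual_creation
-- ===== SOURCE A (Python) =====
-- def edges_set_dual_creation(str_value):
--     if not str_value:
--         return
--
--     edges_set = []
--
--     for i in range(0, len(str_value) - 1):
--         edges_set.append(str_value[i: i+2])
--     edges_set.append(str_value[len(str_value) -1] + str_value[:1])
--
--     return edges_set
-- ===== SOURCE B (Python) =====
-- def edges_set_dual_creation(str_value):
--     if not str_value:
--         return
--     rotated = str_value[1:] + str_value[:1]
--     return [a + b for a, b in zip(str_value, rotated)]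
-- ===== Notes on version B (the rewrite author's own statement) =====
-- stated objective: simpler
-- what changed: Replaces the index loop over n-1 two-character slices plus a separate wrap-around append with a single zip of the string against its left rotation, folding the wrap-around edge into the main pass.
import Mathlib
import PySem

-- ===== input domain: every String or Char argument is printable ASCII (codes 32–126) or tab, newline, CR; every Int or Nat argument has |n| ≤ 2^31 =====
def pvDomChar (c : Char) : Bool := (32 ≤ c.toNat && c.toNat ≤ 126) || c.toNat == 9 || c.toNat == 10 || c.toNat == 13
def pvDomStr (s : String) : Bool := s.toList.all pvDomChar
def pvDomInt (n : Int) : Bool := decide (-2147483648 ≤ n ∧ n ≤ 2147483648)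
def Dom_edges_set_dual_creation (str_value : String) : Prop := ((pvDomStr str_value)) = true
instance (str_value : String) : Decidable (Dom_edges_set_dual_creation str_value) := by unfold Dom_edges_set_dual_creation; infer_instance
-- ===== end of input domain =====

-- B replaces the slice loop plus separate wrap-around append with one zip against the left rotation (simpler decomposition).
-- ===== PORT A =====
def edges_set_dual_creation (str_value : String) : Option (List String) :=
  let cs := str_value.toList
  if cs = [] then none
  else
    -- for i in range(0, len(str_value) - 1): edges_set.append(str_value[i:i+2])
    let edges := (PySem.List.pyRange 0 ((cs.length : Int) - 1) 1).foldl
      (fun acc i => acc ++ [String.ofList (PySem.List.slice cs (some i) (some (i + 2)))]) []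
    -- edges_set.append(str_value[len(str_value)-1] + str_value[:1])  (index provably in range since cs ≠ [])
    let edges := edges ++
      [String.ofList (PySem.List.pyGetD cs ((cs.length : Int) - 1) ' ' :: PySem.List.slice cs none (some 1))]
    some edges

-- ===== PORT B =====
def edges_set_dual_creation_alt (str_value : String) : Option (List String) :=
  let cs := str_value.toList
  if cs = [] then none
  else
    -- rotated = str_value[1:] + str_value[:1]
    let rotated := PySem.List.slice cs (some 1) none ++ PySem.List.slice cs none (some 1)
    -- [a + b for a, b in zip(str_value, rotated)]
    some ((cs.zip rotated).map fun p => String.ofList [p.1, p.2])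

-- ===== PRECONDITION & SPEC =====
def Spec_edges_set_dual_creation (str_value : String) (out : Option (List String)) : Prop := out = edges_set_dual_creation_alt str_value
instance (str_value : String) (out : Option (List String)) : Decidable (Spec_edges_set_dual_creation str_value out) := by unfold Spec_edges_set_dual_creation; infer_instance

-- ===== CLAIM (what is proved, stated in full; the proofs are below) =====
def Claim_equal_edges_set_dual_creation : Prop := ∀ (str_value : String), Dom_edges_set_dual_creation str_value → Spec_edges_set_dual_creation str_value (edges_set_dual_creation str_value)

-- ===== LEMMAS AND PROOFS =====

lemma take_one_of_ne_nil (l : List Char) (h : l ≠ []) : l.take 1 = [l[0]'(List.length_pos_of_ne_nil h)] := by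
  cases l with
  | nil => exact absurd rfl h
  | cons a t => simp

lemma drop_take_two (cs : List Char) (k : Nat) (h : k + 1 < cs.length) :
    (cs.drop k).take 2 = [cs[k], cs[k+1]] := by
  rw [List.drop_eq_getElem_cons (by omega), List.drop_eq_getElem_cons (l := cs) (by omega)]
  rfl

-- A's slice-built edge list equals B's zip-built edge list on every nonempty character list
lemma edges_lists_eq (cs : List Char) (h : cs ≠ []) :
    ((PySem.List.pyRange 0 ((cs.length : Int) - 1) 1).map
        (fun i => String.ofList (PySem.List.slice cs (some i) (some (i + 2)))))
      ++ [String.ofList (PySem.List.pyGetD cs ((cs.length : Int) - 1) ' ' :: PySem.List.slice cs none (some 1))]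
    = (cs.zip (PySem.List.slice cs (some 1) none ++ PySem.List.slice cs none (some 1))).map
        (fun p => String.ofList [p.1, p.2]) := by
  have hpos : 0 < cs.length := List.length_pos_of_ne_nil h
  have h1 : (cs.length : Int) - 1 = ((cs.length - 1 : Nat) : Int) := by omega
  rw [h1, PySem.List.pyRange_zero_natCast, PySem.List.slice_from_one,
      PySem.List.pyGetD_natCast, List.map_map]
  simp only [PySem.List.slice_to (xs := cs) (b := 1) (by norm_num), Int.toNat_one]
  apply List.ext_getElem
  · simp [take_one_of_ne_nil cs h]; omega
  · intro i hi1 hi2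
    have hizip : i < cs.length := by simp [take_one_of_ne_nil cs h] at hi2; omega
    rw [List.getElem_map, List.getElem_zip]
    by_cases hcase : i < cs.length - 1
    · rw [List.getElem_append_left (by simpa using hcase), List.getElem_map, List.getElem_range]
      simp only [Function.comp_apply]
      have hc : ((i : Int) + 2) = ((i + 2 : Nat) : Int) := by push_cast; ring
      have hti : i < cs.tail.length := by simp; omega
      rw [hc, PySem.List.slice_natCast, List.getElem_append_left hti, List.getElem_tail]
      have h2 : (i + 2) - i = 2 := by omega
      rw [h2, drop_take_two cs i (by omega)]
    · have hie : i = cs.length - 1 := by omega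
      rw [List.getElem_append_right (by simpa using hcase)]
      rw [List.getElem_append_right (by simp; omega)]
      simp [take_one_of_ne_nil cs h, hie, List.getElem?_eq_getElem (by omega : cs.length - 1 < cs.length)]

theorem edges_set_dual_creation_eq (s : String) :
    edges_set_dual_creation s = edges_set_dual_creation_alt s := by
  unfold edges_set_dual_creation edges_set_dual_creation_alt
  by_cases h : s.toList = []
  · simp [h]
  · simp only [h, reduceIte]
    rw [PySem.List.foldl_append_singleton_eq_map]
    exact congrArg some (edges_lists_eq s.toList h)

-- ===== VERDICT (by name: the statement is the Claim_ definition above) =====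
theorem edges_set_dual_creation_spec : Claim_equal_edges_set_dual_creation := by
  intro s _
  unfold Spec_edges_set_dual_creation
  exact edges_set_dual_creation_eq s
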